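-- pv_equiv track=rewrite | github.com/m-ahsan-nazer/aoc2021 | day10.py | get_first_c_bracket
-- ===== SOURCE A (Python) =====
-- from typing import List, Tuple, Dict, NewType
--
-- def get_brackets():
--     o_brackets = "[,{,(,<".split(",")
--     c_brackets = "],},),>".split(",")
--     return {"o": o_brackets, "c": c_brackets}
--
-- def get_first_c_bracket(s: str) -> Tuple[str, int]:
--     assert s != ""
--
--     brackets = get_brackets()
--     c_brackets = brackets.get("c")
--     ics = []
--     for c in c_brackets:
--         if c in s:
--             ic = s.index(c)
--             ics.append(ic)
--     if len(ics) >= 1: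
--         min_ic = min(ics)
--         c = s[min_ic]
--         return (c, min_ic)
--     return (None, None)
-- ===== SOURCE B (Python) =====
-- def get_first_c_bracket(s: str):
--     assert s != ""
--     c_brackets = set("]})>")
--     for i, ch in enumerate(s):
--         if ch in c_brackets:
--             return (ch, i)
--     return (None, None)
-- ===== Notes on version B (the rewrite author's own statement) =====
-- stated objective: idiomatic
-- what changed: B replaces A's per-bracket-type passes (four substring scans with 'in'/index plus a min over collected indices) by one left-to-right scan over the characters that returns at the first closing bracket.
-- outside the precondition, e.g. on get_first_c_bracket(''): A raises AssertionError, B raises AssertionError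
import Mathlib
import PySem

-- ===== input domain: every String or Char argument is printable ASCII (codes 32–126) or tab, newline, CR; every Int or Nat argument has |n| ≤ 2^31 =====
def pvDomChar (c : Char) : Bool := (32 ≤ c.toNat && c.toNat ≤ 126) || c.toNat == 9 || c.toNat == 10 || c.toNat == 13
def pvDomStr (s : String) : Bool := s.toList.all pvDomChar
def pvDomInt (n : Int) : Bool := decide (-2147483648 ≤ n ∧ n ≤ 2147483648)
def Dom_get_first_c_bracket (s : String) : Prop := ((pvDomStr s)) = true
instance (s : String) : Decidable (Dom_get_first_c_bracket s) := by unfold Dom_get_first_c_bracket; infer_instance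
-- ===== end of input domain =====

-- B replaces A's four per-bracket-type passes (in/index plus min over the found indices)
-- by one left-to-right scan that returns at the first closing bracket (idiomatic; same result).

-- ===== PORT A =====
def get_brackets : PySem.Dict String (List String) :=
  let o_brackets := (PySem.Str.split? "[,{,(,<" ",").getD []   -- sep "," ≠ "", so split? is some
  let c_brackets := (PySem.Str.split? "],},),>" ",").getD []
  PySem.Dict.ofList [("o", o_brackets), ("c", c_brackets)]

def get_first_c_bracket (s : String) : Option String × Option Int :=
  let brackets := get_brackets
  let c_brackets := (brackets.get? "c").getD []      -- brackets.get("c"); the key is present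
  let ics := c_brackets.foldl
    (fun acc c => if PySem.Str.isIn c s then acc ++ [PySem.Str.find s c] else acc) ([] : List Int)
  if ics.length ≥ 1 then
    match PySem.List.min? ics (fun x => x) with
    | some min_ic =>
      match PySem.Str.pyGet? s min_ic with
      | some ch => (some (String.singleton ch), some min_ic)
      | none => (none, none)      -- unreachable: min_ic is a found index, in range
    | none => (none, none)        -- unreachable: ics is nonempty here
  else (none, none)

-- ===== PORT B =====
-- the for-loop over enumerate(s) with early return of Source B
def altGo (cbs : List Char) : List Char → Int → Option String × Option Int
  | [], _ => (none, none)
  | c :: rest, i => if c ∈ cbs then (some (String.singleton c), some i) else altGo cbs rest (i + 1)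

def get_first_c_bracket_alt (s : String) : Option String × Option Int :=
  let cbs := PySem.Set.ofList "]})>".toList
  altGo cbs s.toList 0

-- ===== PRECONDITION & SPEC =====
-- A (and B) start with `assert s != ""`: the empty string raises AssertionError, so it is excluded.
def Pre_get_first_c_bracket (s : String) : Prop := s ≠ ""
instance (s : String) : Decidable (Pre_get_first_c_bracket s) := by
  unfold Pre_get_first_c_bracket; infer_instance

def pvWitness_get_first_c_bracket : String := "a[]b"

def Spec_get_first_c_bracket (s : String) (out : Option String × Option Int) : Prop :=
  out = get_first_c_bracket_alt s
instance (s : String) (out : Option String × Option Int) : Decidable (Spec_get_first_c_bracket s out) := by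
  unfold Spec_get_first_c_bracket; infer_instance

-- ===== CLAIM (what is proved, stated in full; the proofs are below) =====
def Claim_equal_get_first_c_bracket : Prop :=
  ∀ (s : String), Dom_get_first_c_bracket s → Pre_get_first_c_bracket s →
    Spec_get_first_c_bracket s (get_first_c_bracket s)

-- ===== LEMMAS AND PROOFS =====

def clsChars : List Char := [']', '}', ')', '>']

-- [c] is an infix of l iff c is an element of l
lemma singleton_infix_iff (c : Char) (l : List Char) : [c] <:+: l ↔ c ∈ l := by
  constructor
  · intro h; exact h.sublist.subset (List.mem_singleton_self c)
  · intro h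
    obtain ⟨p, q, hpq⟩ := List.append_of_mem h
    exact ⟨p, q, by simpa using hpq.symm⟩

-- [c] prefixes l.drop j iff l[j]? = some c
lemma singleton_prefix_drop_iff (c : Char) (l : List Char) (j : Nat) :
    [c] <+: l.drop j ↔ l[j]? = some c := by
  rw [← List.head?_drop]
  cases l.drop j with
  | nil => simp
  | cons a t =>
      simp only [List.head?_cons, List.cons_prefix_cons, Option.some.injEq]
      constructor
      · rintro ⟨h, -⟩; exact h.symm
      · intro h; exact ⟨h.symm, List.nil_prefix⟩

-- B's loop returns (none, none) when no scanned character is a closing bracket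
lemma altGo_none (cbs l : List Char) (i : Int) (h : ∀ c ∈ l, c ∉ cbs) :
    altGo cbs l i = (none, none) := by
  induction l generalizing i with
  | nil => rfl
  | cons a t ih =>
      have ha := h a (List.mem_cons_self)
      simp only [altGo, if_neg ha]
      exact ih _ (fun c hc => h c (List.mem_cons_of_mem a hc))

-- B's loop returns the first hit
lemma altGo_found (cbs : List Char) (l : List Char) (i : Int) (k : Nat) (hk : k < l.length)
    (hb : l[k] ∈ cbs) (hfirst : ∀ j (hj : j < l.length), j < k → l[j] ∉ cbs) :
    altGo cbs l i = (some (String.singleton l[k]), some (i + k)) := by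
  induction l generalizing i k with
  | nil => simp at hk
  | cons a t ih =>
      cases k with
      | zero => simp only [altGo, List.getElem_cons_zero] at hb ⊢; simp [if_pos hb]
      | succ m =>
          have ha : a ∉ cbs := hfirst 0 (by omega) (Nat.succ_pos m)
          simp only [altGo, if_neg ha]
          have := ih (i + 1) m (by simpa using hk) (by simpa using hb)
            (fun j hj hjk => by simpa using hfirst (j + 1) (by omega) (by omega))
          rw [this]
          simp only [Prod.mk.injEq, Option.some.injEq]
          constructor
          · rfl
          · push_cast; ring

-- first index satisfying a decidable predicate, from existence
lemma exists_first_hit (P : Char → Prop) [DecidablePred P] (l : List Char)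
    (h : ∃ c ∈ l, P c) :
    ∃ k, ∃ hk : k < l.length, P (l[k]'hk) ∧ ∀ j (hj : j < l.length), j < k → ¬ P (l[j]'hj) := by
  induction l with
  | nil => simp at h
  | cons a t ih =>
      by_cases hPa : P a
      · exact ⟨0, Nat.succ_pos _, hPa, fun j hj hjk => absurd hjk (Nat.not_lt_zero j)⟩
      · obtain ⟨c, hc, hPc⟩ := h
        rcases List.mem_cons.mp hc with rfl | hct
        · exact absurd hPc hPa
        · obtain ⟨k, hk, hPk, hfirst⟩ := ih ⟨c, hct, hPc⟩
          refine ⟨k + 1, by simpa using hk, by simpa using hPk, ?_⟩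
          intro j hj hjk
          cases j with
          | zero => simpa using hPa
          | succ m => simpa using hfirst m (by omega) (by omega)

-- any occurrence of a closing bracket is at index ≥ k, the first closing position
lemma find_ge_first (l : List Char) (c : Char) (hc : c ∈ clsChars) (hin : c ∈ l)
    (k : Nat) (hfirst : ∀ j (hj : j < l.length), j < k → l[j] ∉ clsChars) :
    (k : Int) ≤ PySem.Chars.find l [c] := by
  have hnn : 0 ≤ PySem.Chars.find l [c] :=
    (PySem.Chars.find_nonneg_iff l [c]).mpr ((singleton_infix_iff c l).mpr hin)
  obtain ⟨hpre, -⟩ := PySem.Chars.find_spec hnn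
  set t := (PySem.Chars.find l [c]).toNat with ht
  have hget : l[t]? = some c := (singleton_prefix_drop_iff c l t).mp hpre
  have htlen : t < l.length := by
    by_contra hge
    rw [List.getElem?_eq_none (by omega)] at hget
    simp at hget
  by_contra hlt
  push Not at hlt
  have htk : t < k := by omega
  have h1 : l[t] ∉ clsChars := hfirst t htlen htk
  have h2 : l[t] = c := by
    have := hget; rwa [List.getElem?_eq_getElem htlen, Option.some.injEq] at this
  rw [h2] at h1
  exact h1 hc

-- the first occurrence of the bracket standing at the first closing position is exactly there
lemma find_eq_first (l : List Char) (k : Nat) (hk : k < l.length)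
    (hfirst : ∀ j (hj : j < l.length), j < k → l[j] ∉ clsChars) (hb : l[k] ∈ clsChars) :
    PySem.Chars.find l [l[k]] = (k : Int) := by
  have hin : l[k] ∈ l := List.getElem_mem hk
  have hge : (k : Int) ≤ PySem.Chars.find l [l[k]] := find_ge_first l l[k] hb hin k hfirst
  have hnn : 0 ≤ PySem.Chars.find l [l[k]] := le_trans (Int.natCast_nonneg k) hge
  obtain ⟨-, hmin⟩ := PySem.Chars.find_spec hnn
  have hatk : [l[k]] <+: l.drop k :=
    (singleton_prefix_drop_iff l[k] l k).mpr (List.getElem?_eq_getElem hk)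
  have hle : (PySem.Chars.find l [l[k]]).toNat ≤ k := by
    by_contra hgt
    exact hmin k (by omega) hatk
  omega

-- each index A collects for a present bracket string is ≥ the first closing position
lemma collected_ge (s : String) (l : List Char) (hl : l = s.toList) (cs : String) (c : Char)
    (htl : cs.toList = [c]) (hc : c ∈ clsChars) (hcin : PySem.Str.isIn cs s = true)
    (k : Nat) (hfirst : ∀ j (hj : j < l.length), j < k → l[j] ∉ clsChars) :
    (k : Int) ≤ PySem.Str.find s cs := by
  rw [PySem.Str.find_eq, htl, ← hl]
  rw [PySem.Str.isIn_eq, htl, ← hl] at hcin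
  exact find_ge_first l c hc
    ((singleton_infix_iff c l).mp ((PySem.Chars.isIn_iff_infix _ _).mp hcin)) k hfirst

-- a bracket string is absent when no character of s is a closing bracket
lemma not_collected (s : String) (l : List Char) (hl : l = s.toList) (cs : String) (c : Char)
    (htl : cs.toList = [c]) (hc : c ∈ clsChars) (hex : ∀ x ∈ l, x ∉ clsChars) :
    PySem.Str.isIn cs s = false := by
  rw [PySem.Str.isIn_eq, htl, ← hl]
  apply (PySem.Chars.isIn_eq_false_iff _ _).mpr
  intro hinf
  exact hex c ((singleton_infix_iff c l).mp hinf) hc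

-- ===== VERDICT (by name: the statement is the Claim_ definition above) =====
theorem get_first_c_bracket_spec : Claim_equal_get_first_c_bracket := by
  intro s _ _
  unfold Spec_get_first_c_bracket get_first_c_bracket get_first_c_bracket_alt
  have hcb : ((get_brackets.get? "c").getD []) = ["]", "}", ")", ">"] := by decide
  have hset : PySem.Set.ofList "]})>".toList = clsChars := by decide
  simp only [hcb, hset]
  set l := s.toList with hl
  -- reduce A's loop to filter + map over the four bracket strings
  rw [PySem.List.foldl_append_if]
  simp only [List.nil_append]
  by_cases hex : ∃ c ∈ l, c ∈ clsChars
  · -- there is a closing bracket; k is the first index of one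
    obtain ⟨k, hk, hbk, hfirst⟩ := exists_first_hit (fun c => c ∈ clsChars) l hex
    -- every collected index is ≥ k
    have hics_lb : ∀ x ∈ (["]", "}", ")", ">"].filter
        (fun c => PySem.Str.isIn c s)).map (fun c => PySem.Str.find s c), (k : Int) ≤ x := by
      intro x hx
      obtain ⟨c, hcf, rfl⟩ := List.mem_map.mp hx
      obtain ⟨hcls, hcin⟩ := List.mem_filter.mp hcf
      fin_cases hcls
      · exact collected_ge s l hl "]" ']' (by decide) (by decide) hcin k hfirst
      · exact collected_ge s l hl "}" '}' (by decide) (by decide) hcin k hfirst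
      · exact collected_ge s l hl ")" ')' (by decide) (by decide) hcin k hfirst
      · exact collected_ge s l hl ">" '>' (by decide) (by decide) hcin k hfirst
    have hb4 : l[k] = ']' ∨ l[k] = '}' ∨ l[k] = ')' ∨ l[k] = '>' := by
      have := hbk; simp [clsChars] at this; tauto
    have hsing : String.singleton l[k] ∈ ["]", "}", ")", ">"] := by
      rcases hb4 with h | h | h | h <;> rw [h] <;> decide
    have hsingtoList : (String.singleton l[k]).toList = [l[k]] := by
      rcases hb4 with h | h | h | h <;> rw [h] <;> decide
    have hbin : l[k] ∈ l := List.getElem_mem hk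
    -- k itself is collected (for the bracket found at position k)
    have hmem : (k : Int) ∈ (["]", "}", ")", ">"].filter
        (fun c => PySem.Str.isIn c s)).map (fun c => PySem.Str.find s c) := by
      refine List.mem_map.mpr ⟨String.singleton l[k], List.mem_filter.mpr ⟨hsing, ?_⟩, ?_⟩
      · rw [PySem.Str.isIn_eq, hsingtoList, ← hl]
        exact (PySem.Chars.isIn_iff_infix _ _).mpr ((singleton_infix_iff l[k] l).mpr hbin)
      · rw [PySem.Str.find_eq, hsingtoList, ← hl]
        exact find_eq_first l k hk hfirst hbk
    set ics := (["]", "}", ")", ">"].filter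
        (fun c => PySem.Str.isIn c s)).map (fun c => PySem.Str.find s c) with hics
    have hne : ics ≠ [] := List.ne_nil_of_mem hmem
    have hlen : ics.length ≥ 1 := by
      have := List.length_pos_iff.mpr hne
      omega
    rw [if_pos hlen]
    obtain ⟨m, hm⟩ : ∃ m, PySem.List.min? ics (fun x => x) = some m := by
      cases hmm : PySem.List.min? ics (fun x => x) with
      | none => exact absurd ((PySem.List.min?_eq_none_iff ics (fun x => x)).mp hmm) hne
      | some m => exact ⟨m, rfl⟩
    have hmk : m = (k : Int) := by
      have h1 : m ≤ (k : Int) := PySem.List.min?_isMin hm (k : Int) hmem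
      have h2 : (k : Int) ≤ m := hics_lb m (PySem.List.min?_mem hm)
      omega
    rw [hm, hmk]
    have hget : PySem.Str.pyGet? s (k : Int) = some l[k] := by
      rw [PySem.Str.pyGet?_natCast, ← hl, List.getElem?_eq_getElem hk]
    simp only [hget]
    rw [altGo_found clsChars l 0 k hk hbk hfirst]
    simp
  · -- no closing bracket anywhere
    push Not at hex
    have hfilter : (["]", "}", ")", ">"].filter (fun c => PySem.Str.isIn c s)) = [] := by
      apply List.filter_eq_nil_iff.mpr
      intro c hc
      fin_cases hc
      · rw [Bool.not_eq_true]
        exact not_collected s l hl "]" ']' (by decide) (by decide) hex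
      · rw [Bool.not_eq_true]
        exact not_collected s l hl "}" '}' (by decide) (by decide) hex
      · rw [Bool.not_eq_true]
        exact not_collected s l hl ")" ')' (by decide) (by decide) hex
      · rw [Bool.not_eq_true]
        exact not_collected s l hl ">" '>' (by decide) (by decide) hex
    rw [hfilter]
    simp only [List.map_nil, List.length_nil]
    rw [if_neg (by omega)]
    exact (altGo_none _ l 0 hex).symm
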